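-- pv_equiv track=rewrite | github.com/Endergamer1/RockPythonScissors | RPS2/SumExcl.py | SumExcl
-- ===== SOURCE A (Python) =====
-- def SumExcl(n: int, excluded: int =()) -> int:
--         x: range = range(0, n + 1)
--         sum: int = 0
--         for b in x:
--                 if b in excluded:
--                         pass
--                 else:
--                         sum = sum + b
--         return sum
-- ===== SOURCE B (Python) =====
-- def SumExcl(n: int, excluded: int =()) -> int:
--     total = n * (n + 1) // 2 if n >= 0 else 0
--     return total - sum({e for e in excluded if 0 <= e <= n})
-- ===== Notes on version B (the rewrite author's own statement) =====
-- stated objective: faster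
-- what changed: Replaces the O(n*m) loop over range(0, n+1) with membership tests by the Gauss closed form n*(n+1)//2 minus the sum of the deduplicated excluded values that lie in [0, n].
import Mathlib
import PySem

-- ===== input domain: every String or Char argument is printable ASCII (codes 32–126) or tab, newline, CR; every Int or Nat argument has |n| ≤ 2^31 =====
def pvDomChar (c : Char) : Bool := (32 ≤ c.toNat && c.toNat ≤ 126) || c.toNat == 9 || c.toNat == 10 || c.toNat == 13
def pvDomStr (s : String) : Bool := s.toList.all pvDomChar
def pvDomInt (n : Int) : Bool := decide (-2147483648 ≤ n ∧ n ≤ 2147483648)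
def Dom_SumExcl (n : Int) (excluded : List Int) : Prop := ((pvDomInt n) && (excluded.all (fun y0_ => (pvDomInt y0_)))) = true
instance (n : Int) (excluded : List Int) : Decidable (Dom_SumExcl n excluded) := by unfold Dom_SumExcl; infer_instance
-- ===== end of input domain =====

-- B replaces A's loop over range(0, n+1) with a membership test per element by the Gauss closed
-- form n*(n+1)//2 minus the sum of the deduplicated excluded values lying in [0, n]; same return value.

-- ===== PORT A =====
-- for b in range(0, n+1): if b in excluded: pass else: sum = sum + b
def SumExcl (n : Int) (excluded : List Int) : Int :=
  (PySem.List.pyRange 0 (n + 1)).foldl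
    (fun sum b => if b ∈ excluded then sum else sum + b) 0

-- ===== PORT B =====
-- total = n*(n+1)//2 if n >= 0 else 0; return total - sum({e for e in excluded if 0 <= e <= n})
def SumExcl_alt (n : Int) (excluded : List Int) : Int :=
  (if 0 ≤ n then PySem.Int.floordiv (n * (n + 1)) 2 else 0)
    - (PySem.Set.ofList (excluded.filter (fun e => decide (0 ≤ e) && decide (e ≤ n)))).sum

-- ===== PRECONDITION & SPEC =====
def Spec_SumExcl (n : Int) (excluded : List Int) (out : Int) : Prop := out = SumExcl_alt n excluded
instance (n : Int) (excluded : List Int) (out : Int) : Decidable (Spec_SumExcl n excluded out) := by unfold Spec_SumExcl; infer_instance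

-- ===== CLAIM (what is proved, stated in full; the proofs are below) =====
def Claim_equal_SumExcl : Prop := ∀ (n : Int) (excluded : List Int), Dom_SumExcl n excluded → Spec_SumExcl n excluded (SumExcl n excluded)

-- ===== LEMMAS AND PROOFS =====

-- A's loop accumulates the sum of the range elements that are not in `excluded`.
theorem sumExcl_foldl_eq (E : List Int) (l : List Int) (a : Int) :
    l.foldl (fun s b => if b ∈ E then s else s + b) a
      = a + (l.filter (fun b => !(E.contains b))).sum := by
  induction l generalizing a with
  | nil => simp
  | cons x t ih =>
    simp only [List.foldl_cons, List.filter_cons]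
    by_cases hx : x ∈ E
    · simp [hx, ih]
    · simp [hx, ih, add_assoc]

-- splitting a sum by a Boolean predicate
theorem sum_split (l : List Int) (p : Int → Bool) :
    (l.filter (fun b => !p b)).sum = l.sum - (l.filter p).sum := by
  induction l with
  | nil => simp
  | cons x t ih => cases hp : p x <;> simp [hp, ih] <;> ring

-- Gauss: twice the sum of range m is m(m-1).
theorem two_mul_sum_range (m : Nat) :
    2 * (List.map (fun k : Nat => (k : Int)) (List.range m)).sum = (m : Int) * ((m : Int) - 1) := by
  induction m with
  | zero => simp
  | succ m ih =>
    rw [List.range_succ, List.map_append, List.sum_append]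
    simp only [List.map_cons, List.map_nil, List.sum_cons, List.sum_nil]
    push_cast
    linear_combination ih

-- The range list is duplicate-free.
theorem nodup_pyRange_zero (b : Int) : (PySem.List.pyRange 0 b).Nodup := by
  rcases le_or_gt b 0 with hb | hb
  · have h : PySem.List.pyRange 0 b = [] := by
      apply List.eq_nil_iff_forall_not_mem.mpr
      intro x hx
      have := PySem.List.mem_pyRange_one.mp hx
      omega
    simp [h]
  · obtain ⟨m, hm⟩ : ∃ m : Nat, b = (m : Int) := ⟨b.toNat, by omega⟩
    rw [hm, PySem.List.pyRange_zero_natCast]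
    exact List.Nodup.map (fun a b h => by exact_mod_cast h) List.nodup_range

-- sum of the in-range members of `excluded` = sum of the deduplicated in-range excluded values
theorem filter_sum_eq_set_sum (n : Int) (E : List Int) :
    ((PySem.List.pyRange 0 (n + 1)).filter (fun b => E.contains b)).sum
      = (PySem.Set.ofList (E.filter (fun e => decide (0 ≤ e) && decide (e ≤ n)))).sum := by
  apply List.Perm.sum_eq
  rw [List.perm_ext_iff_of_nodup ((nodup_pyRange_zero (n + 1)).filter _)
      (PySem.Set.nodup_ofList _)]
  intro x
  simp only [List.mem_filter, PySem.Set.mem_ofList, PySem.List.mem_pyRange_one,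
    List.contains_iff_mem, decide_eq_true_eq, Bool.and_eq_true]
  constructor
  · rintro ⟨⟨h0, h1⟩, hE⟩; exact ⟨hE, by omega, by omega⟩
  · rintro ⟨hE, h0, h1⟩; exact ⟨⟨h0, by omega⟩, hE⟩

-- the sum of the range equals B's Gauss term
theorem range_sum_eq_gauss (n : Int) :
    (PySem.List.pyRange 0 (n + 1)).sum
      = (if 0 ≤ n then PySem.Int.floordiv (n * (n + 1)) 2 else 0) := by
  rcases le_or_gt 0 n with hn | hn
  · rw [if_pos hn]
    obtain ⟨m, hm⟩ : ∃ m : Nat, n + 1 = (m : Int) := ⟨(n + 1).toNat, by omega⟩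
    rw [hm, PySem.List.pyRange_zero_natCast, PySem.Int.floordiv_eq_ediv_of_pos (by norm_num)]
    have h2 := two_mul_sum_range m
    rw [show n * (m : Int) = 2 * (List.map (fun k : Nat => (k : Int)) (List.range m)).sum by
      linear_combination (m : Int) * hm - h2]
    exact (Int.mul_ediv_cancel_left _ (by norm_num : (2:Int) ≠ 0)).symm
  · rw [if_neg (by omega)]
    have h : PySem.List.pyRange 0 (n + 1) = [] := by
      apply List.eq_nil_iff_forall_not_mem.mpr
      intro x hx
      have := PySem.List.mem_pyRange_one.mp hx
      omega
    simp [h]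

-- ===== VERDICT (by name: the statement is the Claim_ definition above) =====
theorem SumExcl_spec : Claim_equal_SumExcl := by
  intro n excluded _
  show SumExcl n excluded = SumExcl_alt n excluded
  rw [SumExcl, SumExcl_alt, sumExcl_foldl_eq, sum_split, filter_sum_eq_set_sum,
    range_sum_eq_gauss]
  ring
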